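-- pv_equiv track=rewrite | github.com/acidsound/acidnet | src/acidnet/simulator/simulation.py | _best_food_in_inventory
-- ===== SOURCE A (Python) =====
-- FOOD_ITEMS = ("stew", "bread", "fish", "wheat")
--
-- CONSUMPTION_VALUE = {"wheat": 10.0, "bread": 26.0, "fish": 21.0, "stew": 34.0}
--
-- def _best_food_in_inventory(inventory: dict[str, int]) -> str | None:
--     best = None
--     best_value = -1.0
--     for item in FOOD_ITEMS:
--         if inventory.get(item, 0) > 0 and CONSUMPTION_VALUE[item] > best_value:
--             best = item
--             best_value = CONSUMPTION_VALUE[item]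
--     return best
-- ===== SOURCE B (Python) =====
-- FOOD_ITEMS = ("stew", "bread", "fish", "wheat")
--
-- CONSUMPTION_VALUE = {"wheat": 10.0, "bread": 26.0, "fish": 21.0, "stew": 34.0}
--
-- def _best_food_in_inventory(inventory: dict[str, int]) -> str | None:
--     # sort foods by consumption value, highest first, and take the first one present
--     for item in sorted(FOOD_ITEMS, key=lambda it: CONSUMPTION_VALUE[it], reverse=True):
--         if inventory.get(item, 0) > 0:
--             return item
--     return None
-- ===== Notes on version B (the rewrite author's own statement) =====
-- stated objective: alternative
-- what changed: B replaces the running-best scan with a sort of the food items by consumption value descending followed by a first-match early return; no best/best_value state is maintained.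
import Mathlib
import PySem

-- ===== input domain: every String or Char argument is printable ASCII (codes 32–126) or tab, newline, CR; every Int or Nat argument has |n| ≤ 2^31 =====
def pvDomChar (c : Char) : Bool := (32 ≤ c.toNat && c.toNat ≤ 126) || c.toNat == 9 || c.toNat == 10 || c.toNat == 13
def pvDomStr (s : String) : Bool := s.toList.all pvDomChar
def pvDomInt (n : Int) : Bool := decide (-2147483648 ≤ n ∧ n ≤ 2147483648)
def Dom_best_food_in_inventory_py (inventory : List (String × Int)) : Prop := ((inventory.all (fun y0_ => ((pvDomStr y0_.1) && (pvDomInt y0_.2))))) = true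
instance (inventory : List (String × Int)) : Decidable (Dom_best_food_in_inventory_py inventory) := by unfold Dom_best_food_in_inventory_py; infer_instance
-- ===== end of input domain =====

-- B changes the decomposition: sort foods by consumption value descending, return the first present one (alternative, same result).

-- ===== PORT A =====
def pvFoodItems : List String := ["stew", "bread", "fish", "wheat"]
-- CONSUMPTION_VALUE: the float values are all integral, ported as Int (comparisons are exact)
def pvCV : PySem.Dict String Int := PySem.Dict.mk [("wheat", 10), ("bread", 26), ("fish", 21), ("stew", 34)]
-- CONSUMPTION_VALUE[item]: every item looked up is a key of the dict, so [] = getD (never raises here)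
def best_food_in_inventory_py (inventory : List (String × Int)) : Option String :=
  (pvFoodItems.foldl
    (fun (st : Option String × Int) item =>
      if (PySem.Dict.mk inventory).getD item (0:Int) > 0 ∧ PySem.Dict.getD pvCV item 0 > st.2
      then (some item, PySem.Dict.getD pvCV item 0)
      else st)
    (none, -1)).1

-- ===== PORT B =====
def pvFirstPresent (inventory : List (String × Int)) : List String → Option String
  | [] => none
  | it :: rest =>
    if (PySem.Dict.mk inventory).getD it (0:Int) > 0 then some it else pvFirstPresent inventory rest

def best_food_in_inventory_py_alt (inventory : List (String × Int)) : Option String :=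
  pvFirstPresent inventory
    (PySem.List.sorted pvFoodItems (fun it => PySem.Dict.getD pvCV it 0) true)

-- ===== PRECONDITION & SPEC =====
def Spec_best_food_in_inventory_py (inventory : List (String × Int)) (out : Option String) : Prop := out = best_food_in_inventory_py_alt inventory
instance (inventory : List (String × Int)) (out : Option String) : Decidable (Spec_best_food_in_inventory_py inventory out) := by unfold Spec_best_food_in_inventory_py; infer_instance

-- ===== CLAIM (what is proved, stated in full; the proofs are below) =====
def Claim_equal_best_food_in_inventory_py : Prop := ∀ (inventory : List (String × Int)), Dom_best_food_in_inventory_py inventory → Spec_best_food_in_inventory_py inventory (best_food_in_inventory_py inventory)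

-- ===== LEMMAS AND PROOFS =====
lemma pvOrder_eq :
    PySem.List.sorted pvFoodItems (fun it => PySem.Dict.getD pvCV it 0) true
      = ["stew", "bread", "fish", "wheat"] := by decide

lemma cv_stew : PySem.Dict.getD pvCV "stew" 0 = 34 := by decide
lemma cv_bread : PySem.Dict.getD pvCV "bread" 0 = 26 := by decide
lemma cv_fish : PySem.Dict.getD pvCV "fish" 0 = 21 := by decide
lemma cv_wheat : PySem.Dict.getD pvCV "wheat" 0 = 10 := by decide

-- ===== VERDICT (by name: the statement is the Claim_ definition above) =====
theorem best_food_in_inventory_py_spec : Claim_equal_best_food_in_inventory_py := by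
  intro inv _
  unfold Spec_best_food_in_inventory_py best_food_in_inventory_py best_food_in_inventory_py_alt
  rw [pvOrder_eq]
  by_cases h1 : (PySem.Dict.mk inv).getD "stew" (0:Int) > 0 <;>
  by_cases h2 : (PySem.Dict.mk inv).getD "bread" (0:Int) > 0 <;>
  by_cases h3 : (PySem.Dict.mk inv).getD "fish" (0:Int) > 0 <;>
  by_cases h4 : (PySem.Dict.mk inv).getD "wheat" (0:Int) > 0 <;>
    simp [pvFoodItems, pvFirstPresent, List.foldl, cv_stew, cv_bread, cv_fish, cv_wheat,
      h1, h2, h3, h4]
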